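-- pv_equiv track=rewrite | github.com/smcreyno/comp110-23f-workspace | exercises/ex10/data_utils.py | count
-- ===== SOURCE A (Python) =====
-- def count(vals: list[str]) -> dict[str, int]:
--     """Given vals, count produces a dict where each key is a unique val and has the count of the number of times it appears."""
--     result: dict[str, int] = {}
--     for elem in vals:
--         if elem in result:
--             result[elem] += 1
--         else:
--             result[elem] = 1
--     return result
-- ===== SOURCE B (Python) =====
-- def count(vals: list[str]) -> dict[str, int]:
--     """Given vals, count produces a dict where each key is a unique val and has the count of the number of times it appears."""
--     result: dict[str, int] = {}
--     rest = vals
--     while rest: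
--         head = rest[0]
--         remaining = [v for v in rest if v != head]
--         result[head] = len(rest) - len(remaining)
--         rest = remaining
--     return result
-- ===== Notes on version B (the rewrite author's own statement) =====
-- stated objective: alternative
-- what changed: Replaces A's per-element membership-test/increment dict loop with a strip-the-head loop: each iteration filters out every copy of the current first element, records its count as a length difference, and continues on the remainder, emitting keys in first-seen order.
import Mathlib
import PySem

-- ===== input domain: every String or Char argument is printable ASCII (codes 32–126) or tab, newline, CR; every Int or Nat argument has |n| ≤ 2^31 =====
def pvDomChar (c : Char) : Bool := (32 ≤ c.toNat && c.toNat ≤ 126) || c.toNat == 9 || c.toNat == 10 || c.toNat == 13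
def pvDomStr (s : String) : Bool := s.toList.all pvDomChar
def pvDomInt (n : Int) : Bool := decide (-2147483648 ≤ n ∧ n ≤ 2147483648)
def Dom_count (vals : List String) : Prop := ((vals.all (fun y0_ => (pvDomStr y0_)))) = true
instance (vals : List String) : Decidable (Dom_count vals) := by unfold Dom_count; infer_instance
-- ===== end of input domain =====

-- B replaces A's per-element membership-test/increment loop by a strip-the-head loop:
-- each iteration filters out every copy of the current first element, records its count as
-- a length difference, and continues on the remainder (same value, same first-seen order).

-- ===== PORT A =====
-- result = {}; for elem in vals: if elem in result: result[elem] += 1 else: result[elem] = 1; return result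
def count (vals : List String) : List (String × Int) :=
  (vals.foldl
    (fun result elem =>
      if result.contains elem then result.modify elem 0 (· + 1)
      else result.insert elem 1)
    PySem.Dict.empty).items

-- ===== PORT B =====
-- result = {}; rest = vals
-- while rest: head = rest[0]; remaining = [v for v in rest if v != head];
--             result[head] = len(rest) - len(remaining); rest = remaining
-- return result
-- The while loop is ported as the tail recursion on `rest` below; each iteration writes a
-- fresh key, so the growing dict's items are exactly the entries in emission order (cons).
def count_alt (vals : List String) : List (String × Int) :=
  match vals with
  | [] => []
  | head :: tail =>
    let rest := (head :: tail).filter (fun v => v ≠ head)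
    (head, ((head :: tail).length : Int) - (rest.length : Int)) :: count_alt rest
termination_by vals.length
decreasing_by
  have h : (head :: tail).filter (fun v => decide (v ≠ head)) =
      tail.filter (fun v => decide (v ≠ head)) := by simp
  simp only [h, List.length_cons]
  exact Nat.lt_succ_of_le (List.length_filter_le _ _)

-- ===== PRECONDITION & SPEC =====
def Spec_count (vals : List String) (out : List (String × Int)) : Prop := out = count_alt vals
instance (vals : List String) (out : List (String × Int)) : Decidable (Spec_count vals out) := by unfold Spec_count; infer_instance

-- ===== CLAIM =====
def Claim_equal_count : Prop := ∀ (vals : List String), Dom_count vals → Spec_count vals (count vals)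

-- ===== LEMMAS AND PROOFS =====

-- A's branchy loop body is pointwise the Counter step, so A's dict is Counter(vals).
theorem countA_eq_counter (vals : List String) :
    (vals.foldl
      (fun result elem =>
        if result.contains elem then result.modify elem 0 (· + 1)
        else result.insert elem 1)
      PySem.Dict.empty) = PySem.Dict.counter vals := by
  rw [PySem.Dict.counter_eq_foldl]
  apply PySem.List.foldl_congr_mem
  intro d x _
  by_cases h : d.contains x = true
  · simp [h, PySem.Dict.modify]
  · simp only [Bool.not_eq_true] at h
    simp [h, PySem.Dict.modify, PySem.Dict.getD_of_not_contains (h := h)]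

-- Dedup commutes with filtering.
theorem ofList_filter (p : String → Bool) (l : List String) :
    PySem.Set.ofList (l.filter p) = (PySem.Set.ofList l).filter p := by
  induction l with
  | nil => rfl
  | cons x l ih =>
    by_cases hx : p x = true
    · rw [List.filter_cons_of_pos hx, PySem.Set.ofList_cons, PySem.Set.ofList_cons, ih]
      simp only [PySem.Set.discard, List.filter_cons_of_pos hx, List.filter_filter]
      congr 1
      apply List.filter_congr
      intro a _
      exact Bool.and_comm _ _
    · rw [List.filter_cons_of_neg (by simpa using hx), PySem.Set.ofList_cons, ih]
      simp only [PySem.Set.discard, List.filter_cons_of_neg (by simpa using hx),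
        List.filter_filter]
      apply List.filter_congr
      intro a _
      by_cases hax : a = x
      · subst hax; simp [hx]
      · simp [hax]

-- Number of copies of the head = length drop under filtering it out (as Nats).
theorem count_head_eq (head : String) (l : List String) :
    l.count head + (l.filter (fun v => v ≠ head)).length = l.length := by
  induction l with
  | nil => rfl
  | cons x l ih =>
    simp only [ne_eq, decide_not] at ih ⊢
    by_cases h : x = head <;>
      simp [h] <;> omega

-- B computes Counter(vals).items: keys deduped in first-seen order, each with its count.
theorem count_alt_eq (vals : List String) :
    count_alt vals = (PySem.Set.ofList vals).map (fun k => (k, (vals.count k : Int))) := by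
  induction hn : vals.length using Nat.strong_induction_on generalizing vals with
  | _ n ih =>
  match vals with
  | [] => simp [count_alt]
  | head :: tail =>
    subst hn
    set rest := (head :: tail).filter (fun v => v ≠ head) with hrestdef
    have hrest : rest = tail.filter (fun v => v ≠ head) := by
      simp [hrestdef]
    have hlt : rest.length < (head :: tail).length := by
      rw [hrest, List.length_cons]
      exact Nat.lt_succ_of_le (List.length_filter_le _ _)
    rw [count_alt, ih rest.length hlt rest rfl, PySem.Set.ofList_cons, List.map_cons]
    congr 1
    · -- head entry: length difference = count of head
      have h := count_head_eq head (head :: tail)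
      have hr : rest.length = ((head :: tail).filter (fun v => v ≠ head)).length := by
        rw [hrest]; simp
      congr 1
      rw [hr]
      omega
    · -- remaining entries
      rw [hrest, ofList_filter]
      have : (PySem.Set.ofList tail).discard head =
          (PySem.Set.ofList tail).filter (fun v => v ≠ head) := by
        simp only [PySem.Set.discard]
        apply List.filter_congr
        intro a _
        by_cases h : a = head <;> simp [h]
      rw [this]
      apply List.map_congr_left
      intro k hk
      have hkh : k ≠ head := by
        have := List.of_mem_filter hk
        simpa using this
      have h1 : (tail.filter (fun v => v ≠ head)).count k = tail.count k :=
        List.count_filter (by simpa using hkh)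
      have h2 : (head :: tail).count k = tail.count k := by
        rw [List.count_cons]
        simp [Ne.symm hkh]
      rw [h1, h2]

-- ===== VERDICT =====
theorem count_spec : Claim_equal_count := by
  intro vals _
  show count vals = count_alt vals
  rw [count_alt_eq]
  unfold count
  rw [countA_eq_counter, PySem.Dict.items_counter]
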